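-- pv_equiv track=rewrite | github.com/amajoah/museq_ebio | preprocess_seq.py | is_chimera
-- ===== SOURCE A (Python) =====
-- from typing import List, Tuple, Dict
--
-- def is_chimera(seq: str, parents: List[str], k=20) -> bool:
--     # 간이 검사: 임의 분할점에서 앞은 P1, 뒤는 P2와 일치하면 chimera로 간주
--     for i in range(k, len(seq)-k, k):
--         left, right = seq[:i], seq[i:]
--         match_left = any(left in p for p in parents)
--         match_right= any(right in p for p in parents)
--         if match_left and match_right:
--             return True
--     return False
-- ===== SOURCE B (Python) =====
-- from typing import List
--
-- def is_chimera(seq: str, parents: List[str], k=20) -> bool: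
--     # Candidate split points are i = j*k for j = 1 .. (len(seq)-k-1)//k.
--     # "seq[:i] matches a parent" is monotone (downward) in i and
--     # "seq[i:] matches a parent" is monotone (upward) in i, so instead of
--     # scanning every candidate, binary-search the last matchable prefix
--     # candidate jL and the first matchable suffix candidate jR: a chimera
--     # split exists iff jR <= jL.
--     n = len(seq)
--     if k <= 0:
--         return False
--     lastj = (n - k - 1) // k
--     if lastj < 1 or not parents:
--         return False
--
--     def pref_ok(j):
--         sub = seq[:j * k]
--         return any(sub in p for p in parents)
--
--     def suf_ok(j):
--         sub = seq[j * k:]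
--         return any(sub in p for p in parents)
--
--     if not pref_ok(1):
--         return False
--     if not suf_ok(lastj):
--         return False
--     lo, hi = 1, lastj
--     while lo < hi:
--         mid = (lo + hi + 1) // 2
--         if pref_ok(mid):
--             lo = mid
--         else:
--             hi = mid - 1
--     jL = lo
--     lo, hi = 1, lastj
--     while lo < hi:
--         mid = (lo + hi) // 2
--         if suf_ok(mid):
--             hi = mid
--         else:
--             lo = mid + 1
--     jR = lo
--     return jR <= jL
-- ===== Notes on version B (the rewrite author's own statement) =====
-- stated objective: alternative
-- what changed: Prefix matchability is monotone (downward) and suffix matchability monotone (upward) in the split point, so B binary-searches the candidate split points j*k for the last prefix-matchable one jL and the first suffix-matchable one jR and answers jR <= jL, instead of scanning every candidate split with a full parent scan at each.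
import Mathlib
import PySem

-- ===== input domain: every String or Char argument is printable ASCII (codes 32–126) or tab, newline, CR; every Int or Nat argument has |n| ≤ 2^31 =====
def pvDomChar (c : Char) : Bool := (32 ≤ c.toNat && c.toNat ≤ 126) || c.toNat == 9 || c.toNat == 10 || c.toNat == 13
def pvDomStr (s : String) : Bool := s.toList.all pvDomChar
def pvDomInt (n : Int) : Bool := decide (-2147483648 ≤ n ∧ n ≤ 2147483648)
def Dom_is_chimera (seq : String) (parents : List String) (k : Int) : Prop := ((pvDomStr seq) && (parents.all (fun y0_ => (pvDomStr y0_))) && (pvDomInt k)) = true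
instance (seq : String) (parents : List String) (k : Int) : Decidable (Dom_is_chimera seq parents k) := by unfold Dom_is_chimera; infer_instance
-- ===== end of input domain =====

-- B: instead of testing both halves against every parent at each multiple-of-k split point,
-- it binary-searches the monotone prefix/suffix matchability thresholds over the candidate
-- split points and compares them (fewer parent scans when there are many candidates).

-- ===== PORT A =====
def is_chimera (seq : String) (parents : List String) (k : Int) : Bool :=
  (PySem.List.pyRange k (PySem.Str.len seq - k) k).foldl
    (fun acc i =>
      acc ||
        ((parents.any fun p => PySem.Str.isIn (PySem.Str.slice seq none (some i)) p) &&
         (parents.any fun p => PySem.Str.isIn (PySem.Str.slice seq (some i) none) p)))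
    false

-- ===== PORT B =====
-- bounds of Python's (x // 2), used by the binary searches' termination
theorem floordiv_two_bounds (x : Int) :
    2 * PySem.Int.floordiv x 2 ≤ x ∧ x < 2 * PySem.Int.floordiv x 2 + 2 := by
  have h := (PySem.Int.floordiv_eq_iff_of_pos
    (a := x) (b := 2) (q := PySem.Int.floordiv x 2) (by norm_num)).mp rfl
  omega

-- B's first while loop: largest point of [lo, hi] satisfying ok (given ok lo, ok downward closed)
def bsearchDown (ok : Int → Bool) (lo hi : Int) : Int :=
  if _h : lo < hi then
    let mid := PySem.Int.floordiv (lo + hi + 1) 2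
    if ok mid then bsearchDown ok mid hi else bsearchDown ok lo (mid - 1)
  else lo
termination_by (hi - lo).toNat
decreasing_by
  · have := floordiv_two_bounds (lo + hi + 1); omega
  · have := floordiv_two_bounds (lo + hi + 1); omega

-- B's second while loop: smallest point of [lo, hi] satisfying ok (given ok hi, ok upward closed)
def bsearchUp (ok : Int → Bool) (lo hi : Int) : Int :=
  if _h : lo < hi then
    let mid := PySem.Int.floordiv (lo + hi) 2
    if ok mid then bsearchUp ok lo mid else bsearchUp ok (mid + 1) hi
  else lo
termination_by (hi - lo).toNat
decreasing_by
  · have := floordiv_two_bounds (lo + hi); omega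
  · have := floordiv_two_bounds (lo + hi); omega

def is_chimera_alt (seq : String) (parents : List String) (k : Int) : Bool :=
  let n := PySem.Str.len seq
  if k ≤ 0 then false
  else
    let lastj := PySem.Int.floordiv (n - k - 1) k
    if lastj < 1 ∨ parents = [] then false
    else
      let prefOk := fun (j : Int) =>
        parents.any fun p => PySem.Str.isIn (PySem.Str.slice seq none (some (j * k))) p
      let sufOk := fun (j : Int) =>
        parents.any fun p => PySem.Str.isIn (PySem.Str.slice seq (some (j * k)) none) p
      if prefOk 1 = false then false
      else if sufOk lastj = false then false
      else decide (bsearchUp sufOk 1 lastj ≤ bsearchDown prefOk 1 lastj)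

-- ===== PRECONDITION & SPEC =====
-- Pre_ excludes only k = 0, on which Python's range(k, len(seq)-k, k) raises ValueError ('range() arg 3 must not be zero').
def Pre_is_chimera (seq : String) (parents : List String) (k : Int) : Prop := k ≠ 0
instance (seq : String) (parents : List String) (k : Int) : Decidable (Pre_is_chimera seq parents k) := by unfold Pre_is_chimera; infer_instance
def pvWitness_is_chimera : String × List String × Int := ("ab", ["ab"], 1)

def Spec_is_chimera (seq : String) (parents : List String) (k : Int) (out : Bool) : Prop := out = is_chimera_alt seq parents k
instance (seq : String) (parents : List String) (k : Int) (out : Bool) : Decidable (Spec_is_chimera seq parents k out) := by unfold Spec_is_chimera; infer_instance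

-- ===== CLAIM (what is proved, stated in full; the proofs are below) =====
def Claim_equal_is_chimera : Prop := ∀ (seq : String) (parents : List String) (k : Int), Dom_is_chimera seq parents k → Pre_is_chimera seq parents k → Spec_is_chimera seq parents k (is_chimera seq parents k)

-- ===== LEMMAS AND PROOFS =====

theorem foldl_or_eq_any {α : Type} (f : α → Bool) (l : List α) (b : Bool) :
    l.foldl (fun acc x => acc || f x) b = (b || l.any f) := by
  induction l generalizing b with
  | nil => simp
  | cons a t ih => simp [ih, Bool.or_assoc]

theorem bsearchDown_spec (ok : Int → Bool) (lo hi : Int) :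
    lo ≤ hi → ok lo = true →
    (∀ i j : Int, lo ≤ i → i ≤ j → j ≤ hi → ok j = true → ok i = true) →
    lo ≤ bsearchDown ok lo hi ∧ bsearchDown ok lo hi ≤ hi ∧
      ∀ i : Int, lo ≤ i → i ≤ hi → (ok i = true ↔ i ≤ bsearchDown ok lo hi) := by
  fun_induction bsearchDown ok lo hi with
  | case1 lo hi h mid hok ih =>
    intro hle hlo hm
    have hb := floordiv_two_bounds (lo + hi + 1)
    have hmid1 : lo < mid := by simp only [mid]; omega
    have hmid2 : mid ≤ hi := by simp only [mid]; omega
    obtain ⟨h1, h2, h3⟩ := ih (by omega) hok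
      (fun i j hi' hij hj hoj => hm i j (by omega) hij hj hoj)
    refine ⟨by omega, h2, fun i hi0 hi1 => ?_⟩
    by_cases hc : mid ≤ i
    · exact h3 i hc hi1
    · exact iff_of_true (hm i mid hi0 (by omega) hmid2 hok) (by omega)
  | case2 lo hi h mid hok ih =>
    intro hle hlo hm
    have hb := floordiv_two_bounds (lo + hi + 1)
    have hmid1 : lo < mid := by simp only [mid]; omega
    have hmid2 : mid ≤ hi := by simp only [mid]; omega
    obtain ⟨h1, h2, h3⟩ := ih (by omega) hlo
      (fun i j hi' hij hj hoj => hm i j hi' hij (by omega) hoj)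
    refine ⟨h1, by omega, fun i hi0 hi1 => ?_⟩
    by_cases hc : i ≤ mid - 1
    · exact h3 i hi0 hc
    · refine iff_of_false (fun hoi => ?_) (by omega)
      exact absurd (hm mid i (by omega) (by omega) hi1 hoi) (by simp [hok])
  | case3 lo hi h =>
    intro hle hlo hm
    have : lo = hi := by omega
    refine ⟨le_refl _, hle, fun i hi0 hi1 => ?_⟩
    have hix : i = lo := by omega
    subst hix
    exact iff_of_true hlo (by omega)


theorem bsearchUp_spec (ok : Int → Bool) (lo hi : Int) :
    lo ≤ hi → ok hi = true →
    (∀ i j : Int, lo ≤ i → i ≤ j → j ≤ hi → ok i = true → ok j = true) →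
    lo ≤ bsearchUp ok lo hi ∧ bsearchUp ok lo hi ≤ hi ∧
      ∀ i : Int, lo ≤ i → i ≤ hi → (ok i = true ↔ bsearchUp ok lo hi ≤ i) := by
  fun_induction bsearchUp ok lo hi with
  | case1 lo hi h mid hok ih =>
    intro hle hhi hm
    have hb := floordiv_two_bounds (lo + hi)
    have hmid1 : lo ≤ mid := by simp only [mid]; omega
    have hmid2 : mid < hi := by simp only [mid]; omega
    obtain ⟨h1, h2, h3⟩ := ih (by omega) hok
      (fun i j hi' hij hj hoi => hm i j hi' hij (by omega) hoi)
    refine ⟨h1, by omega, fun i hi0 hi1 => ?_⟩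
    by_cases hc : i ≤ mid
    · exact h3 i hi0 hc
    · exact iff_of_true (hm mid i hmid1 (by omega) hi1 hok) (by omega)
  | case2 lo hi h mid hok ih =>
    intro hle hhi hm
    have hb := floordiv_two_bounds (lo + hi)
    have hmid1 : lo ≤ mid := by simp only [mid]; omega
    have hmid2 : mid < hi := by simp only [mid]; omega
    obtain ⟨h1, h2, h3⟩ := ih (by omega) hhi
      (fun i j hi' hij hj hoi => hm i j (by omega) hij hj hoi)
    refine ⟨by omega, h2, fun i hi0 hi1 => ?_⟩
    by_cases hc : mid + 1 ≤ i
    · exact h3 i hc hi1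
    · refine iff_of_false (fun hoi => ?_) (by omega)
      exact absurd (hm i mid hi0 (by omega) (by omega) hoi) (by simp [hok])
  | case3 lo hi h =>
    intro hle hhi hm
    refine ⟨le_refl _, hle, fun i hi0 hi1 => ?_⟩
    have hix : i = lo := by omega
    have hlh : lo = hi := by omega
    subst hix; subst hlh
    exact iff_of_true hhi (by omega)


theorem pOk_iff (seq : String) (parents : List String) (i : Int) (h0 : 0 ≤ i) :
    ((parents.any fun p => PySem.Str.isIn (PySem.Str.slice seq none (some i)) p) = true) ↔
      ∃ p ∈ parents, seq.toList.take i.toNat <:+: p.toList := by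
  have hs : (PySem.Str.slice seq none (some i)).toList = seq.toList.take i.toNat := by
    simp [PySem.Str.toList_slice, PySem.Chars.slice_eq_listSlice, PySem.List.slice_to _ h0]
  simp only [List.any_eq_true, PySem.Str.isIn_eq, hs, PySem.Chars.isIn_iff_infix]


theorem sOk_iff (seq : String) (parents : List String) (i : Int) (h0 : 0 ≤ i) :
    ((parents.any fun p => PySem.Str.isIn (PySem.Str.slice seq (some i)) p) = true) ↔
      ∃ p ∈ parents, seq.toList.drop i.toNat <:+: p.toList := by
  have hs : (PySem.Str.slice seq (some i)).toList = seq.toList.drop i.toNat := by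
    simp [PySem.Str.toList_slice, PySem.Chars.slice_eq_listSlice, PySem.List.slice_from _ h0]
  simp only [List.any_eq_true, PySem.Str.isIn_eq, hs, PySem.Chars.isIn_iff_infix]


theorem pOk_mono (seq : String) (parents : List String) (i j : Int) (h0 : 0 ≤ i) (hij : i ≤ j) :
    ((parents.any fun p => PySem.Str.isIn (PySem.Str.slice seq none (some j)) p) = true) →
    ((parents.any fun p => PySem.Str.isIn (PySem.Str.slice seq none (some i)) p) = true) := by
  rw [pOk_iff _ _ _ h0, pOk_iff _ _ _ (le_trans h0 hij)]
  rintro ⟨p, hp, hinf⟩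
  refine ⟨p, hp, ?_⟩
  have heq : seq.toList.take i.toNat = (seq.toList.take j.toNat).take i.toNat := by
    rw [List.take_take, min_eq_left (Int.toNat_le_toNat hij)]
  exact ((heq ▸ List.take_prefix i.toNat (seq.toList.take j.toNat)).isInfix).trans hinf


theorem sOk_mono (seq : String) (parents : List String) (i j : Int) (h0 : 0 ≤ i) (hij : i ≤ j) :
    ((parents.any fun p => PySem.Str.isIn (PySem.Str.slice seq (some i)) p) = true) →
    ((parents.any fun p => PySem.Str.isIn (PySem.Str.slice seq (some j)) p) = true) := by
  rw [sOk_iff _ _ _ h0, sOk_iff _ _ _ (le_trans h0 hij)]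
  rintro ⟨p, hp, hinf⟩
  refine ⟨p, hp, ?_⟩
  have heq : seq.toList.drop j.toNat = (seq.toList.drop i.toNat).drop (j.toNat - i.toNat) := by
    rw [List.drop_drop]
    congr 1
    have := Int.toNat_le_toNat hij
    omega
  exact ((heq ▸ List.drop_suffix (j.toNat - i.toNat) (seq.toList.drop i.toNat)).isInfix).trans hinf


-- ===== VERDICT (by name: the statement is the Claim_ definition above) =====
theorem is_chimera_spec : Claim_equal_is_chimera := by
  intro seq parents k _hdom hpre
  unfold Pre_is_chimera at hpre
  unfold Spec_is_chimera
  have hnlen : PySem.Str.len seq = (seq.toList.length : Int) := PySem.Str.len_eq seq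
  have hn0 : 0 ≤ PySem.Str.len seq := by rw [hnlen]; exact_mod_cast Int.natCast_nonneg _
  by_cases hk : k < 0
  · have hr : PySem.List.pyRange k (PySem.Str.len seq - k) k = [] := by
      simp [PySem.List.pyRange, hpre, show ¬ 0 < k by omega]
      intro h
      exfalso
      have hl0 : (0:Int) ≤ (seq.length : Int) := Int.natCast_nonneg _
      omega
    unfold is_chimera
    rw [hr]
    simp [is_chimera_alt, show k ≤ 0 by omega]
  · have hk' : 0 < k := by omega
    set n := PySem.Str.len seq with hndef
    set lastj := PySem.Int.floordiv (n - k - 1) k with hlastdef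
    have hlb := (PySem.Int.floordiv_eq_iff_of_pos (a := n - k - 1) (b := k)
      (q := lastj) hk').mp rfl
    unfold is_chimera
    rw [foldl_or_eq_any, Bool.false_or]
    set F : Int → Bool := fun i =>
      (parents.any fun p => PySem.Str.isIn (PySem.Str.slice seq none (some i)) p) &&
      (parents.any fun p => PySem.Str.isIn (PySem.Str.slice seq (some i) none) p) with hFdef
    have hjle : ∀ j : Int, 1 ≤ j → (j ≤ lastj ↔ j * k ≤ n - k - 1) := by
      intro j hj
      constructor
      · intro h
        calc j * k ≤ lastj * k := mul_le_mul_of_nonneg_right h hk'.le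
          _ ≤ n - k - 1 := hlb.1
      · intro h
        by_contra hlt
        push Not at hlt
        have : (lastj + 1) * k ≤ j * k := mul_le_mul_of_nonneg_right (by omega) hk'.le
        omega
    have hA : (PySem.List.pyRange k (n - k) k).any F = true ↔
        ∃ j : Int, 1 ≤ j ∧ j ≤ lastj ∧ F (j * k) = true := by
      rw [List.any_eq_true]
      constructor
      · rintro ⟨i, hmem, hfi⟩
        rw [PySem.List.mem_pyRange_iff_of_pos hk'] at hmem
        obtain ⟨m1, m2, m3⟩ := hmem
        obtain ⟨c, hc⟩ := m3
        have hik : (c + 1) * k = i := by ring_nf; linarith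
        have hc1 : 1 ≤ c + 1 := by
          by_contra h
          push Not at h
          have : k * c ≤ k * (-1) := mul_le_mul_of_nonneg_left (by omega) hk'.le
          omega
        refine ⟨c + 1, hc1, ?_, by rw [hik]; exact hfi⟩
        rw [hjle _ hc1, hik]
        omega
      · rintro ⟨j, h1, h2, hf⟩
        refine ⟨j * k, ?_, hf⟩
        rw [PySem.List.mem_pyRange_iff_of_pos hk']
        have hjk : 1 * k ≤ j * k := mul_le_mul_of_nonneg_right h1 hk'.le
        have hub := (hjle j h1).mp h2
        exact ⟨by linarith, by omega, ⟨j - 1, by ring⟩⟩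
    by_cases hl1 : lastj < 1
    · have hBf : is_chimera_alt seq parents k = false := by
        simp only [is_chimera_alt]
        rw [if_neg (show ¬ k ≤ 0 by omega), if_pos (Or.inl hl1)]
      rw [hBf]
      cases hx : (PySem.List.pyRange k (n - k) k).any F with
      | false => rfl
      | true => obtain ⟨jx, h1, h2, _⟩ := hA.mp hx; omega
    · push Not at hl1
      by_cases hp : parents = []
      · have hBf : is_chimera_alt seq parents k = false := by
          simp only [is_chimera_alt]
          rw [if_neg (show ¬ k ≤ 0 by omega), if_pos (Or.inr hp)]
        rw [hBf]
        cases hx : (PySem.List.pyRange k (n - k) k).any F with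
        | false => rfl
        | true =>
          obtain ⟨jx, h1, h2, hf⟩ := hA.mp hx
          rw [hFdef] at hf
          simp [hp] at hf
      · set P : Int → Bool := fun j =>
          parents.any fun p => PySem.Str.isIn (PySem.Str.slice seq none (some (j * k))) p with hPdef
        set S : Int → Bool := fun j =>
          parents.any fun p => PySem.Str.isIn (PySem.Str.slice seq (some (j * k)) none) p with hSdef
        have hFP : ∀ j : Int, F (j * k) = (P j && S j) := fun _ => rfl
        have hmonoP : ∀ i j : Int, 1 ≤ i → i ≤ j → j ≤ lastj → P j = true → P i = true := by
          intro i j h1 hij _ h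
          exact pOk_mono seq parents (i * k) (j * k)
            (mul_nonneg (by omega) hk'.le) (mul_le_mul_of_nonneg_right hij hk'.le) h
        have hmonoS : ∀ i j : Int, 1 ≤ i → i ≤ j → j ≤ lastj → S i = true → S j = true := by
          intro i j h1 hij _ h
          exact sOk_mono seq parents (i * k) (j * k)
            (mul_nonneg (by omega) hk'.le) (mul_le_mul_of_nonneg_right hij hk'.le) h
        by_cases hP1 : P 1 = true
        · by_cases hSl : S lastj = true
          · obtain ⟨hL1b, hL2b, hLc⟩ := bsearchDown_spec P 1 lastj hl1 hP1 hmonoP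
            obtain ⟨hR1b, hR2b, hRc⟩ := bsearchUp_spec S 1 lastj hl1 hSl hmonoS
            set jL := bsearchDown P 1 lastj with hjLdef
            set jR := bsearchUp S 1 lastj with hjRdef
            have hB : is_chimera_alt seq parents k = decide (jR ≤ jL) := by
              simp only [is_chimera_alt]
              rw [if_neg (show ¬ k ≤ 0 by omega),
                if_neg (show ¬ (lastj < 1 ∨ parents = []) by push Not; exact ⟨by omega, hp⟩),
                if_neg (show ¬ P 1 = false by simp [hP1]),
                if_neg (show ¬ S lastj = false by simp [hSl])]
            rw [hB]
            by_cases hcmp : jR ≤ jL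
            · rw [decide_eq_true hcmp]
              apply hA.mpr
              refine ⟨jR, hR1b, hR2b, ?_⟩
              rw [hFP, Bool.and_eq_true]
              exact ⟨(hLc jR hR1b hR2b).mpr hcmp, (hRc jR hR1b hR2b).mpr le_rfl⟩
            · rw [decide_eq_false hcmp]
              cases hx : (PySem.List.pyRange k (n - k) k).any F with
              | false => rfl
              | true =>
                obtain ⟨jx, h1, h2, hf⟩ := hA.mp hx
                rw [hFP, Bool.and_eq_true] at hf
                have := (hLc jx h1 h2).mp hf.1
                have := (hRc jx h1 h2).mp hf.2
                omega
          · have hBf : is_chimera_alt seq parents k = false := by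
              simp only [is_chimera_alt]
              rw [if_neg (show ¬ k ≤ 0 by omega),
                if_neg (show ¬ (lastj < 1 ∨ parents = []) by push Not; exact ⟨by omega, hp⟩),
                if_neg (show ¬ P 1 = false by simp [hP1]),
                if_pos (show S lastj = false by simpa using hSl)]
            rw [hBf]
            cases hx : (PySem.List.pyRange k (n - k) k).any F with
            | false => rfl
            | true =>
              obtain ⟨jx, h1, h2, hf⟩ := hA.mp hx
              rw [hFP, Bool.and_eq_true] at hf
              exact absurd (hmonoS jx lastj h1 h2 le_rfl hf.2) hSl
        · have hBf : is_chimera_alt seq parents k = false := by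
            simp only [is_chimera_alt]
            rw [if_neg (show ¬ k ≤ 0 by omega),
              if_neg (show ¬ (lastj < 1 ∨ parents = []) by push Not; exact ⟨by omega, hp⟩),
              if_pos (show P 1 = false by simpa using hP1)]
          rw [hBf]
          cases hx : (PySem.List.pyRange k (n - k) k).any F with
          | false => rfl
          | true =>
            obtain ⟨jx, h1, h2, hf⟩ := hA.mp hx
            rw [hFP, Bool.and_eq_true] at hf
            exact absurd (hmonoP 1 jx le_rfl h1 h2 hf.1) hP1
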